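-- pv_equiv track=rewrite | github.com/ninepig/leecode_dd_2024 | zAmazon/oa/zmethodExplained/getKrepetivieFeature.py | getkRepValue
-- ===== SOURCE A (Python) =====
-- def getkRepValue(user_history, k):
--     ans = 0
--     n = len(user_history)
--     distinct = set(list(user_history))
--     for char in list(distinct):
--         substrings = 0
--         count = 0
--         left = 0
--         for right in range(n):
--             if user_history[right] == char:
--                 count += 1
--             while count >= k:
--                 substrings += n - right
--                 if user_history[left] == char:
--                     count -= 1
--                 left += 1
--         ans = max(ans, substrings)
--
--     return ans
-- ===== SOURCE B (Python) =====
-- def getkRepValue(user_history, k):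
--     n = len(user_history)
--     pos = {}
--     for i, ch in enumerate(user_history):
--         pos.setdefault(ch, []).append(i)
--     best = 0
--     for ch, p in pos.items():
--         m = len(p)
--         total = 0
--         for j in range(k, m + 1):
--             end = p[j] if j < m else n
--             total += (end - p[j - 1]) * (p[j - k] + 1)
--         best = max(best, total)
--     return best
-- ===== Notes on version B (the rewrite author's own statement) =====
-- stated objective: faster
-- what changed: Replaced the per-distinct-char O(n) sliding-window scan with one pass that records each char's occurrence positions and then counts qualifying substrings per char in closed form from consecutive occurrence gaps.
import Mathlib
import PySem

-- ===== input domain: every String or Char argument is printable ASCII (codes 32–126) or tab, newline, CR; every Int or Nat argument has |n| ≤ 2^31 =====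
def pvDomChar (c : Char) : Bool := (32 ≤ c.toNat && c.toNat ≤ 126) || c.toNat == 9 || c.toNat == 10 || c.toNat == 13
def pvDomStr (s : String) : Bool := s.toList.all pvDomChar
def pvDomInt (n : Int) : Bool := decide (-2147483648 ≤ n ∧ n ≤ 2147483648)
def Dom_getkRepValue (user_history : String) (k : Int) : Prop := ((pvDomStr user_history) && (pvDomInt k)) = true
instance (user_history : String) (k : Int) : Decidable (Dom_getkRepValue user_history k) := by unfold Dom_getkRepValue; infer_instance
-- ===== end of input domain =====

-- B replaces A's per-distinct-char sliding-window scan by one occurrence-position pass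
-- plus a closed-form count per char (objective: faster, measured).

-- ===== PORT A =====
-- the inner 'while count >= k' loop of A; state = (substrings, count, left); the fuel
-- argument only makes the recursion structural (Python raises IndexError where pyGet? is none)
def aWhile (l : List Char) (c : Char) (k n right : Int) :
    Nat → Int × Int × Int → Int × Int × Int
  | 0, st => st
  | fuel+1, st =>
    if k ≤ st.2.1 then
      match PySem.List.pyGet? l st.2.2 with
      | some ch =>
          aWhile l c k n right fuel
            (st.1 + (n - right), if ch == c then st.2.1 - 1 else st.2.1, st.2.2 + 1)
      | none => (st.1 + (n - right), st.2.1, st.2.2)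
    else st

-- the body of A's 'for char in list(distinct)' loop: the sliding-window count for one char
-- (A folds max over the distinct chars; max is order-independent, so the set's order is immaterial)
def aChar (l : List Char) (c : Char) (k : Int) : Int :=
  let n : Int := PySem.List.len l
  ((PySem.List.pyRange 0 n).foldl
    (fun st right =>
      aWhile l c k n right (l.length + 1)
        (st.1, if PySem.List.pyGetD l right ' ' == c then st.2.1 + 1 else st.2.1, st.2.2))
    (0, 0, 0)).1

def getkRepValue (user_history : String) (k : Int) : Int :=
  (PySem.Set.ofList user_history.toList).foldl
    (fun ans ch => max ans (aChar user_history.toList ch k)) 0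

-- ===== PORT B =====
-- the body of B's 'for ch, p in pos.items()' loop: closed-form count from p's occurrence gaps
def bChar (p : List Int) (k n : Int) : Int :=
  let m : Int := PySem.List.len p
  (PySem.List.pyRange k (m + 1)).foldl
    (fun total j =>
      total + ((if j < m then PySem.List.pyGetD p j 0 else n) - PySem.List.pyGetD p (j - 1) 0)
            * (PySem.List.pyGetD p (j - k) 0 + 1)) 0

def getkRepValue_alt (user_history : String) (k : Int) : Int :=
  (((PySem.List.enumerate user_history.toList).map (fun q => (q.2, q.1))).foldl
      (fun d q => d.modify q.1 [] (fun v => v ++ [q.2])) PySem.Dict.empty).items.foldl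
    (fun best q => max best (bChar q.2 k (PySem.List.len user_history.toList))) 0

-- ===== PRECONDITION & SPEC =====
-- Pre_ excludes exactly the inputs on which A raises: for k <= 0 and a nonempty string the
-- window never closes, 'left' runs past the end and user_history[left] raises IndexError.
def Pre_getkRepValue (user_history : String) (k : Int) : Prop :=
  user_history = "" ∨ 1 ≤ k
instance (user_history : String) (k : Int) : Decidable (Pre_getkRepValue user_history k) := by
  unfold Pre_getkRepValue; infer_instance
def pvWitness_getkRepValue : String × Int := ("abcab", 2)

def Spec_getkRepValue (user_history : String) (k : Int) (out : Int) : Prop := out = getkRepValue_alt user_history k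
instance (user_history : String) (k : Int) (out : Int) : Decidable (Spec_getkRepValue user_history k out) := by unfold Spec_getkRepValue; infer_instance

-- ===== CLAIM (what is proved, stated in full; the proofs are below) =====
def Claim_equal_getkRepValue : Prop := ∀ (user_history : String) (k : Int), Dom_getkRepValue user_history k → Pre_getkRepValue user_history k → Spec_getkRepValue user_history k (getkRepValue user_history k)

-- ===== LEMMAS AND PROOFS =====

def pcnt (l : List Char) (c : Char) (t : Nat) : Nat := (l.take t).count c
def posN (l : List Char) (c : Char) : List Nat :=
  (List.range l.length).filter (fun i => l.getD i ' ' == c)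
theorem pcnt_mono (l : List Char) (c : Char) {t t' : Nat} (h : t ≤ t') :
    pcnt l c t ≤ pcnt l c t' := by
  unfold pcnt
  have : l.take t = (l.take t').take t := by rw [List.take_take, Nat.min_eq_left h]
  rw [this]
  exact List.Sublist.count_le c (List.take_sublist _ _)
theorem pcnt_le_count (l : List Char) (c : Char) (t : Nat) : pcnt l c t ≤ l.count c :=
  List.Sublist.count_le c (List.take_sublist _ _)
theorem pcnt_length (l : List Char) (c : Char) : pcnt l c l.length = l.count c := by
  unfold pcnt; rw [List.take_length]
theorem pcnt_succ (l : List Char) (c : Char) {t : Nat} (h : t < l.length) :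
    pcnt l c (t + 1) = pcnt l c t + (if l.getD t ' ' == c then 1 else 0) := by
  unfold pcnt
  rw [List.take_add_one, List.count_append]
  congr 1
  rw [List.getElem?_eq_getElem h]
  simp [List.getD, List.getElem?_eq_getElem h, List.count_singleton]

theorem pcnt_append (l : List Char) (ch c : Char) {t : Nat} (h : t ≤ l.length) :
    pcnt (l ++ [ch]) c t = pcnt l c t := by
  unfold pcnt; rw [List.take_append_of_le_length h]

theorem posN_append (l : List Char) (ch c : Char) :
    posN (l ++ [ch]) c = posN l c ++ (if ch == c then [l.length] else []) := by
  unfold posN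
  rw [List.length_append, List.length_singleton, List.range_succ, List.filter_append]
  congr 1
  · apply List.filter_congr
    intro i hi
    simp only [List.mem_range] at hi
    rw [List.getD_append _ _ _ _ hi]
  · have h : (l ++ [ch])[l.length]? = some ch := by
      rw [List.getElem?_append_right (le_refl _)]; simp
    simp only [List.filter, List.getD, h, Option.getD_some]
    cases hcc : ch == c <;> simp

theorem posN_length (l : List Char) (c : Char) : (posN l c).length = l.count c := by
  induction l using List.reverseRecOn with
  | nil => rfl
  | append_singleton l ch ih =>
      rw [posN_append, List.length_append, ih, List.count_append, List.count_singleton]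
      by_cases h : ch == c <;> simp [h]

theorem posN_lt (l : List Char) (c : Char) {j : Nat} (h : j < (posN l c).length) :
    (posN l c).getD j 0 < l.length := by
  induction l using List.reverseRecOn with
  | nil => simp [posN] at h
  | append_singleton l ch ih =>
      rw [posN_append] at h ⊢
      rw [List.length_append] at h
      by_cases hj : j < (posN l c).length
      · rw [List.getD_append _ _ _ _ hj]
        have := ih hj
        simp only [List.length_append, List.length_singleton]; omega
      · have hcc : (ch == c) = true := by
          by_contra hx
          simp only [Bool.not_eq_true] at hx
          simp [hx] at h; omega
        simp only [hcc, if_true] at h ⊢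
        have hj' : j = (posN l c).length := by simp at h; omega
        subst hj'
        rw [List.getD_append_right _ _ _ _ (le_refl _)]
        simp
theorem posN_pcnt (l : List Char) (c : Char) {j : Nat} (h : j < (posN l c).length) :
    pcnt l c ((posN l c).getD j 0) = j := by
  induction l using List.reverseRecOn with
  | nil => simp [posN] at h
  | append_singleton l ch ih =>
      rw [posN_append] at h ⊢
      by_cases hj : j < (posN l c).length
      · rw [List.getD_append _ _ _ _ hj, pcnt_append _ _ _ (le_of_lt (posN_lt l c hj))]
        exact ih hj
      · have hcc : (ch == c) = true := by
          by_contra hx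
          simp only [Bool.not_eq_true] at hx
          rw [List.length_append] at h
          simp [hx] at h; omega
        rw [List.length_append, hcc] at h
        simp only [hcc, if_true] at h ⊢
        have hj' : j = (posN l c).length := by simp at h ⊢; omega
        subst hj'
        rw [List.getD_append_right _ _ _ _ (le_refl _)]
        simp only [Nat.sub_self, List.getD_cons_zero]
        rw [pcnt_append _ _ _ (le_refl _), pcnt_length, posN_length]
theorem posN_pcnt_succ (l : List Char) (c : Char) {j : Nat} (h : j < (posN l c).length) :
    pcnt l c ((posN l c).getD j 0 + 1) = j + 1 := by
  have hlt := posN_lt l c h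
  have hp := posN_pcnt l c h
  -- pcnt (p+1) = pcnt p + [l[p] = c]; and l[p] = c since p ∈ posN
  have hget : (posN l c).getD j 0 = (posN l c)[j] := List.getD_eq_getElem _ _ h
  have hmem : (posN l c).getD j 0 ∈ posN l c := by rw [hget]; exact List.getElem_mem h
  have hchar : (l.getD ((posN l c).getD j 0) ' ' == c) = true := by
    have := (List.mem_filter.mp hmem).2
    simpa using this
  rw [pcnt_succ l c hlt, hp, hchar]
  simp

def Wf (l : List Char) (c : Char) (K : Nat) (t : Nat) : Nat :=
  if pcnt l c t < K then 0 else (posN l c).getD (pcnt l c t - K) 0 + 1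

theorem Wf_le (l : List Char) (c : Char) {K : Nat} (hK : 1 ≤ K) (t : Nat) :
    Wf l c K t ≤ t := by
  unfold Wf
  split
  · omega
  · rename_i hge
    have hj : pcnt l c t - K < (posN l c).length := by
      rw [posN_length]
      have h1 := pcnt_le_count l c t
      omega
    by_contra hx
    have hpt : t ≤ (posN l c).getD (pcnt l c t - K) 0 := by omega
    have := pcnt_mono l c hpt
    rw [posN_pcnt l c hj] at this
    omega

theorem Wf_lower (l : List Char) (c : Char) {K : Nat} (hK : 1 ≤ K) {t a : Nat}
    (h : a < Wf l c K t) : pcnt l c a + K ≤ pcnt l c t := by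
  unfold Wf at h
  split at h
  · omega
  · rename_i hge
    have hj : pcnt l c t - K < (posN l c).length := by
      rw [posN_length]
      have h1 := pcnt_le_count l c t
      omega
    have ha : a ≤ (posN l c).getD (pcnt l c t - K) 0 := by omega
    have := pcnt_mono l c ha
    rw [posN_pcnt l c hj] at this
    omega

theorem Wf_upper (l : List Char) (c : Char) {K : Nat} (hK : 1 ≤ K) (t : Nat) :
    pcnt l c t < pcnt l c (Wf l c K t) + K := by
  unfold Wf
  split
  · simpa [pcnt]
  · rename_i hge
    have hj : pcnt l c t - K < (posN l c).length := by
      rw [posN_length]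
      have h1 := pcnt_le_count l c t
      omega
    rw [posN_pcnt_succ l c hj]
    omega

theorem Wf_mono (l : List Char) (c : Char) {K : Nat} (hK : 1 ≤ K) {t t' : Nat} (h : t ≤ t') :
    Wf l c K t ≤ Wf l c K t' := by
  by_contra hx
  have h1 := Wf_lower l c hK (show Wf l c K t' < Wf l c K t by omega)
  have h2 := Wf_upper l c hK t'
  have h3 := pcnt_mono l c h
  omega

theorem Wf_zero (l : List Char) (c : Char) {K : Nat} (hK : 1 ≤ K) : Wf l c K 0 = 0 := by
  unfold Wf
  have : pcnt l c 0 = 0 := by simp [pcnt]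
  rw [this]
  split <;> omega

theorem Wf_append (l : List Char) (ch c : Char) {K : Nat} (hK : 1 ≤ K) {t : Nat}
    (h : t ≤ l.length) : Wf (l ++ [ch]) c K t = Wf l c K t := by
  unfold Wf
  rw [pcnt_append l ch c h, posN_append]
  split
  · rfl
  · rename_i hge
    rw [List.getD_append]
    rw [posN_length]
    have h1 := pcnt_le_count l c t
    have h2 : pcnt l c t ≤ l.count c := pcnt_le_count l c t
    omega

theorem aWhile_spec (l : List Char) (c : Char) {K : Nat} (hK : 1 ≤ K) (t : Nat)
    (ht : t < l.length) :
    ∀ (d a : Nat) (fuel : Nat) (S : Int), a + d = Wf l c K (t + 1) → d ≤ fuel →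
      aWhile l c (K : Int) (l.length : Int) (t : Int) fuel
        (S, (pcnt l c (t + 1) : Int) - (pcnt l c a : Int), (a : Int)) =
      (S + d * ((l.length : Int) - t),
       (pcnt l c (t + 1) : Int) - (pcnt l c (Wf l c K (t + 1)) : Int),
       (Wf l c K (t + 1) : Int)) := by
  intro d
  induction d with
  | zero =>
      intro a fuel S ha hf
      have haW : a = Wf l c K (t + 1) := by omega
      subst haW
      have hstop := Wf_upper l c hK (t + 1)
      have hcond : ¬ ((K : Int) ≤ (pcnt l c (t + 1) : Int) - (pcnt l c (Wf l c K (t+1)) : Int)) := by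
        omega
      cases fuel with
      | zero => simp [aWhile]
      | succ f => simp [aWhile, hcond]
  | succ d ih =>
      intro a fuel S ha hf
      have haW : a < Wf l c K (t + 1) := by omega
      have hWle : Wf l c K (t + 1) ≤ t + 1 := Wf_le l c hK (t + 1)
      have haLen : a < l.length := by omega
      have hlow := Wf_lower l c hK haW
      have hcond : (K : Int) ≤ (pcnt l c (t + 1) : Int) - (pcnt l c a : Int) := by
        omega
      obtain ⟨f, rfl⟩ : ∃ f, fuel = f + 1 := ⟨fuel - 1, by omega⟩
      have hget : PySem.List.pyGet? l (a : Int) = some (l.getD a ' ') := by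
        rw [PySem.List.pyGet?_natCast, List.getElem?_eq_getElem haLen]
        rw [List.getD_eq_getElem _ _ haLen]
      have hsucc := pcnt_succ l c haLen
      rw [show (aWhile l c (K : Int) (l.length : Int) (t : Int) (f+1)
        (S, (pcnt l c (t + 1) : Int) - (pcnt l c a : Int), (a : Int))) =
        aWhile l c (K : Int) (l.length : Int) (t : Int) f
          (S + ((l.length : Int) - t),
           if l.getD a ' ' == c then (pcnt l c (t + 1) : Int) - (pcnt l c a : Int) - 1
             else (pcnt l c (t + 1) : Int) - (pcnt l c a : Int),
           (a : Int) + 1) from by simp [aWhile, hcond, hget]]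
      have hcount : (if l.getD a ' ' == c then (pcnt l c (t + 1) : Int) - (pcnt l c a : Int) - 1
             else (pcnt l c (t + 1) : Int) - (pcnt l c a : Int))
           = (pcnt l c (t + 1) : Int) - (pcnt l c (a + 1) : Int) := by
        cases hca : (l.getD a ' ' == c) with
        | true =>
            rw [hca] at hsucc
            rw [if_pos rfl, hsucc, if_pos rfl]; push_cast; omega
        | false =>
            rw [hca] at hsucc
            simp only [Bool.false_eq_true, if_false] at hsucc ⊢
            rw [hsucc]; push_cast; ring
      rw [hcount]
      have hcast : ((a : Int) + 1) = ((a + 1 : Nat) : Int) := by push_cast; ring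
      rw [hcast]
      rw [ih (a + 1) f (S + ((l.length : Int) - t)) (by omega) (by omega)]
      congr 1
      push_cast; ring

def Gf (l : List Char) (c : Char) (K : Nat) : Nat :=
  ∑ r ∈ Finset.range l.length, Wf l c K (r + 1)

theorem aChar_inv (l : List Char) (c : Char) {K : Nat} (hK : 1 ≤ K) :
    ∀ t, t ≤ l.length →
      (PySem.List.pyRange 0 (t : Int)).foldl
        (fun st right =>
          aWhile l c (K : Int) (l.length : Int) right (l.length + 1)
            (st.1, if PySem.List.pyGetD l right ' ' == c then st.2.1 + 1 else st.2.1, st.2.2))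
        (0, 0, 0) =
      (((∑ r ∈ Finset.range t, Wf l c K (r + 1) : Nat) : Int)
          + (Wf l c K t : Int) * ((l.length : Int) - t),
       (pcnt l c t : Int) - (pcnt l c (Wf l c K t) : Int),
       (Wf l c K t : Int)) := by
  intro t
  induction t with
  | zero =>
      intro _
      simp [Wf_zero l c hK, pcnt]
  | succ t iht =>
      intro ht
      have ht' : t ≤ l.length := by omega
      have hrange : PySem.List.pyRange 0 ((t : Int) + 1) =
          PySem.List.pyRange 0 (t : Int) ++ [(t : Int)] :=
        PySem.List.pyRange_one_succ_right (by positivity)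
      rw [show ((t + 1 : Nat) : Int) = (t : Int) + 1 by push_cast; ring, hrange,
        List.foldl_append, iht ht']
      simp only [List.foldl_cons, List.foldl_nil]
      -- the single step at right = t
      have hgetD : PySem.List.pyGetD l (t : Int) ' ' = l.getD t ' ' :=
        PySem.List.pyGetD_natCast l t ' '
      have hWW : Wf l c K t ≤ Wf l c K (t + 1) := Wf_mono l c hK (by omega)
      have hWle : Wf l c K (t + 1) ≤ t + 1 := Wf_le l c hK (t + 1)
      have hsucc := pcnt_succ l c (show t < l.length by omega)
      have hcount : (if PySem.List.pyGetD l (t : Int) ' ' == c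
            then (pcnt l c t : Int) - (pcnt l c (Wf l c K t) : Int) + 1
            else (pcnt l c t : Int) - (pcnt l c (Wf l c K t) : Int))
          = (pcnt l c (t + 1) : Int) - (pcnt l c (Wf l c K t) : Int) := by
        rw [hgetD]
        cases hca : (l.getD t ' ' == c) with
        | true =>
            rw [hca] at hsucc
            rw [if_pos rfl, hsucc, if_pos rfl]; push_cast; ring
        | false =>
            rw [hca] at hsucc
            simp only [Bool.false_eq_true, if_false] at hsucc ⊢
            rw [hsucc]; push_cast; ring
      rw [hcount]
      have := aWhile_spec l c hK t (by omega) (Wf l c K (t+1) - Wf l c K t) (Wf l c K t)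
        (l.length + 1)
        (((∑ r ∈ Finset.range t, Wf l c K (r + 1) : Nat) : Int)
          + (Wf l c K t : Int) * ((l.length : Int) - t))
        (by omega) (by omega)
      rw [this]
      have hsum : (∑ r ∈ Finset.range (t+1), Wf l c K (r + 1)) =
          (∑ r ∈ Finset.range t, Wf l c K (r + 1)) + Wf l c K (t + 1) :=
        Finset.sum_range_succ _ t
      rw [hsum]
      congr 1
      have hc1 : ((Wf l c K (t+1) - Wf l c K t : Nat) : Int)
          = (Wf l c K (t+1) : Int) - (Wf l c K t : Int) := by
        push_cast [Nat.cast_sub hWW]; ring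
      rw [hc1]
      push_cast
      ring

theorem aChar_eq (l : List Char) (c : Char) {k : Int} (hk : 1 ≤ k) :
    aChar l c k = (Gf l c k.toNat : Int) := by
  obtain ⟨K, rfl⟩ : ∃ K : Nat, k = (K : Int) := ⟨k.toNat, by omega⟩
  have hK : 1 ≤ K := by exact_mod_cast hk
  unfold aChar
  simp only [PySem.List.len]
  rw [aChar_inv l c hK l.length (le_refl _)]
  simp [Gf]

def posInt (l : List Char) (c : Char) : List Int :=
  (((PySem.List.enumerate l).map (fun q => (q.2, q.1))).filter (fun q => q.1 == c)).map (·.2)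

theorem posInt_eq (l : List Char) (c : Char) :
    posInt l c = (posN l c).map (fun i : Nat => (i : Int)) := by
  unfold posInt posN
  rw [PySem.List.enumerate_eq_map_pyRange l ' ']
  simp only [PySem.List.len]
  rw [PySem.List.pyRange_zero_natCast l.length]
  simp [List.filter_map, List.map_map, Function.comp_def, PySem.List.pyGetD_natCast]

theorem bChar_sum (p : List Int) (k n : Int) :
    bChar p k n = ((PySem.List.pyRange k ((p.length : Int) + 1)).map
      (fun j => ((if j < (p.length : Int) then PySem.List.pyGetD p j 0 else n)
          - PySem.List.pyGetD p (j - 1) 0) * (PySem.List.pyGetD p (j - k) 0 + 1))).sum := by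
  unfold bChar
  simp only [PySem.List.len]
  rw [PySem.List.foldl_add, zero_add]
  rfl

theorem pyGetD_cast (P : List Nat) {i : Nat} (h : i < P.length) :
    PySem.List.pyGetD (P.map (fun x : Nat => (x : Int))) (i : Int) 0 = (P.getD i 0 : Int) := by
  have h2 : i < (P.map (fun x : Nat => (x : Int))).length := by rw [List.length_map]; exact h
  rw [PySem.List.pyGetD_natCast, List.getD_eq_getElem _ _ h2, List.getElem_map,
    List.getD_eq_getElem _ _ h]

theorem Gf_append (l : List Char) (ch c : Char) {K : Nat} (hK : 1 ≤ K) :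
    Gf (l ++ [ch]) c K = Gf l c K + Wf (l ++ [ch]) c K (l.length + 1) := by
  unfold Gf
  rw [List.length_append, List.length_singleton, Finset.sum_range_succ]
  congr 1
  exact Finset.sum_congr rfl (fun r hr => Wf_append l ch c hK
    (by have := Finset.mem_range.mp hr; omega))

theorem Gf_zero_of_lt (l : List Char) (c : Char) {K : Nat} (h : l.count c < K) :
    Gf l c K = 0 := by
  unfold Gf
  apply Finset.sum_eq_zero
  intro r _
  unfold Wf
  have := pcnt_le_count l c (r + 1)
  rw [if_pos (by omega)]

theorem count_append_singleton (l : List Char) (ch c : Char) :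
    (l ++ [ch]).count c = l.count c + (if ch == c then 1 else 0) := by
  rw [List.count_append, List.count_singleton]

theorem pcnt_full_append (l : List Char) (ch c : Char) :
    pcnt (l ++ [ch]) c (l.length + 1) = l.count c + (if ch == c then 1 else 0) := by
  have : l.length + 1 = (l ++ [ch]).length := by simp
  rw [this, pcnt_length, count_append_singleton]

theorem bChar_eq' (c : Char) {K : Nat} (hK : 1 ≤ K) (l : List Char) :
    bChar ((posN l c).map (fun i : Nat => (i : Int))) (K : Int) (l.length : Int)
      = (Gf l c K : Int) := by
  induction l using List.reverseRecOn with
  | nil =>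
      rw [bChar_sum]
      have hnil : PySem.List.pyRange (K : Int)
          ((((posN ([] : List Char) c).map (fun i : Nat => (i : Int))).length : Int) + 1) = [] := by
        apply PySem.List.pyRange_one_eq_nil
        have : (posN ([] : List Char) c).length = 0 := by simp [posN]
        rw [List.length_map, this]
        exact_mod_cast hK
      rw [hnil]
      simp [Gf]
  | append_singleton l ch ih =>
      rw [bChar_sum] at ih ⊢
      have hGf := Gf_append l ch c hK
      have hWlast : pcnt (l ++ [ch]) c (l.length + 1)
          = l.count c + (if ch == c then 1 else 0) := pcnt_full_append l ch c
      cases hch : (ch == c) with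
      | false =>
          have hpos' : posN (l ++ [ch]) c = posN l c := by
            rw [posN_append, hch]; simp
          have hm' : ((posN (l ++ [ch]) c).map (fun i : Nat => (i : Int))).length
              = (posN l c).length := by rw [hpos', List.length_map]
          have hcnt' : pcnt (l ++ [ch]) c (l.length + 1) = l.count c := by
            rw [hWlast, hch]; simp
          rw [hGf]
          by_cases hKM : K ≤ l.count c
          · -- split off the last term j = m
            have hlen0 : (posN l c).length = l.count c := posN_length l c
            simp only [hpos', List.length_map, hlen0, List.length_append,
              List.length_singleton] at ih ⊢
            have hsplit : PySem.List.pyRange (K : Int) ((l.count c : Int) + 1)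
                = PySem.List.pyRange (K : Int) (l.count c : Int) ++ [(l.count c : Int)] :=
              PySem.List.pyRange_one_succ_right (by exact_mod_cast hKM)
            rw [hsplit, List.map_append, List.sum_append] at ih ⊢
            have hcongr : ∀ (nn : Int), List.map (fun j =>
                ((if j < (l.count c : Int) then
                    PySem.List.pyGetD ((posN l c).map (fun i : Nat => (i : Int))) j 0
                  else nn) - PySem.List.pyGetD ((posN l c).map (fun i : Nat => (i : Int))) (j - 1) 0)
                * (PySem.List.pyGetD ((posN l c).map (fun i : Nat => (i : Int))) (j - (K : Int)) 0 + 1))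
                (PySem.List.pyRange (K : Int) (l.count c : Int))
              = List.map (fun j =>
                ((if j < (l.count c : Int) then
                    PySem.List.pyGetD ((posN l c).map (fun i : Nat => (i : Int))) j 0
                  else 0) - PySem.List.pyGetD ((posN l c).map (fun i : Nat => (i : Int))) (j - 1) 0)
                * (PySem.List.pyGetD ((posN l c).map (fun i : Nat => (i : Int))) (j - (K : Int)) 0 + 1))
                (PySem.List.pyRange (K : Int) (l.count c : Int)) := by
              intro nn
              apply List.map_congr_left
              intro j hj
              obtain ⟨h1, h2⟩ := PySem.List.mem_pyRange_one.mp hj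
              rw [if_pos h2, if_pos h2]
            rw [hcongr] at ih ⊢
            simp only [List.map_cons, List.map_nil, List.sum_cons, List.sum_nil] at ih ⊢
            have hMK : (l.count c : Int) - (K : Int) = ((l.count c - K : Nat) : Int) := by omega
            have hM1 : (l.count c : Int) - 1 = ((l.count c - 1 : Nat) : Int) := by omega
            have hg1 : PySem.List.pyGetD ((posN l c).map (fun i : Nat => (i : Int)))
                ((l.count c : Int) - (K : Int)) 0 = ((posN l c).getD (l.count c - K) 0 : Int) := by
              rw [hMK]; exact pyGetD_cast (posN l c) (by omega)
            have hW : Wf (l ++ [ch]) c K (l.length + 1) = (posN l c).getD (l.count c - K) 0 + 1 := by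
              unfold Wf
              rw [hcnt', hpos', if_neg (by omega)]
            rw [hW]
            rw [if_neg (by omega)] at ih
            rw [if_neg (by omega)]
            rw [hg1] at ih ⊢
            push_cast at ih ⊢
            linear_combination ih
          · -- empty range on both sides
            have hlen0 : (posN l c).length = l.count c := posN_length l c
            have hempty : PySem.List.pyRange (K : Int)
                ((((posN (l ++ [ch]) c).map (fun i : Nat => (i : Int))).length : Int) + 1) = [] := by
              apply PySem.List.pyRange_one_eq_nil
              rw [hm', hlen0]
              omega
            rw [hempty]
            have hW0 : Wf (l ++ [ch]) c K (l.length + 1) = 0 := by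
              unfold Wf
              rw [if_pos (by rw [hcnt']; omega)]
            rw [Gf_zero_of_lt l c (by omega), hW0]
            simp
      | true =>
          have hpos' : posN (l ++ [ch]) c = posN l c ++ [l.length] := by
            rw [posN_append, hch]; simp
          have hcnt' : pcnt (l ++ [ch]) c (l.length + 1) = l.count c + 1 := by
            rw [hWlast, hch]; simp
          by_cases hKM : K ≤ l.count c + 1
          · have hlen0 : (posN l c).length = l.count c := posN_length l c
            simp only [hpos', List.length_map, hlen0, List.length_append,
              List.length_singleton] at ih ⊢
            push_cast
            have hsplit : PySem.List.pyRange (K : Int) ((l.count c : Int) + 1 + 1)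
                = PySem.List.pyRange (K : Int) ((l.count c : Int) + 1)
                  ++ [(l.count c : Int) + 1] :=
              PySem.List.pyRange_one_succ_right (by omega)
            rw [hsplit, List.map_append, List.sum_append]
            have hgetA : ∀ i : Nat, i < l.count c →
                PySem.List.pyGetD ((posN l c ++ [l.length]).map (fun i : Nat => (i : Int))) (i : Int) 0
                  = PySem.List.pyGetD ((posN l c).map (fun i : Nat => (i : Int))) (i : Int) 0 := by
              intro i hi
              rw [pyGetD_cast _ (by rw [List.length_append, List.length_singleton]; omega),
                pyGetD_cast _ (by omega),
                List.getD_append _ _ _ _ (by omega)]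
            have hgetM : PySem.List.pyGetD ((posN l c ++ [l.length]).map (fun i : Nat => (i : Int)))
                (l.count c : Int) 0 = (l.length : Int) := by
              rw [pyGetD_cast _ (by rw [List.length_append, List.length_singleton]; omega)]
              rw [← hlen0, List.getD_append_right _ _ _ _ (le_refl _)]
              simp
            have hcongr : List.map (fun j =>
                ((if j < (l.count c : Int) + 1 then
                    PySem.List.pyGetD ((posN l c ++ [l.length]).map (fun i : Nat => (i : Int))) j 0
                  else (l.length : Int) + 1)
                  - PySem.List.pyGetD ((posN l c ++ [l.length]).map (fun i : Nat => (i : Int))) (j - 1) 0)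
                * (PySem.List.pyGetD ((posN l c ++ [l.length]).map (fun i : Nat => (i : Int))) (j - (K : Int)) 0 + 1))
                (PySem.List.pyRange (K : Int) ((l.count c : Int) + 1))
              = List.map (fun j =>
                ((if j < (l.count c : Int) then
                    PySem.List.pyGetD ((posN l c).map (fun i : Nat => (i : Int))) j 0
                  else (l.length : Int))
                  - PySem.List.pyGetD ((posN l c).map (fun i : Nat => (i : Int))) (j - 1) 0)
                * (PySem.List.pyGetD ((posN l c).map (fun i : Nat => (i : Int))) (j - (K : Int)) 0 + 1))
                (PySem.List.pyRange (K : Int) ((l.count c : Int) + 1)) := by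
              apply List.map_congr_left
              intro j hj
              obtain ⟨h1, h2⟩ := PySem.List.mem_pyRange_one.mp hj
              obtain ⟨jn, rfl⟩ : ∃ jn : Nat, j = (jn : Int) := ⟨j.toNat, by omega⟩
              have hjK : K ≤ jn := by exact_mod_cast h1
              have hjM : jn ≤ l.count c := by
                have : (jn : Int) < (l.count c : Int) + 1 := h2
                omega
              have hc1 : ((jn : Int) - 1) = ((jn - 1 : Nat) : Int) := by omega
              have hc2 : ((jn : Int) - (K : Int)) = ((jn - K : Nat) : Int) := by omega
              rw [if_pos h2, hc1, hc2,
                hgetA (jn - 1) (by omega), hgetA (jn - K) (by omega)]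
              by_cases hlt : jn < l.count c
              · rw [hgetA jn hlt, if_pos (by exact_mod_cast hlt)]
              · have hjeq : jn = l.count c := by omega
                subst hjeq
                rw [hgetM, if_neg (by omega)]
            rw [hcongr, ih]
            simp only [List.map_cons, List.map_nil, List.sum_cons, List.sum_nil]
            have hcM1 : ((l.count c : Int) + 1 - 1) = ((l.count c : Nat) : Int) := by omega
            have hcMK : ((l.count c : Int) + 1 - (K : Int)) = ((l.count c + 1 - K : Nat) : Int) := by
              omega
            rw [if_neg (by omega), hcM1, hcMK, hgetM,
              pyGetD_cast _ (by rw [List.length_append, List.length_singleton]; omega)]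
            have hW : Wf (l ++ [ch]) c K (l.length + 1)
                = (posN l c ++ [l.length]).getD (l.count c + 1 - K) 0 + 1 := by
              unfold Wf
              rw [hcnt', hpos', if_neg (by omega)]
            rw [hGf, hW]
            push_cast
            ring
          · have hlen0 : (posN l c).length = l.count c := posN_length l c
            have hempty : PySem.List.pyRange (K : Int)
                ((((posN (l ++ [ch]) c).map (fun i : Nat => (i : Int))).length : Int) + 1) = [] := by
              apply PySem.List.pyRange_one_eq_nil
              rw [hpos', List.length_map, List.length_append, List.length_singleton, hlen0]
              push_cast; omega
            rw [hempty, hGf]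
            have hW0 : Wf (l ++ [ch]) c K (l.length + 1) = 0 := by
              unfold Wf
              rw [if_pos (by rw [hcnt']; omega)]
            rw [Gf_zero_of_lt l c (by omega), hW0]
            simp

theorem perchar (l : List Char) (c : Char) {k : Int} (hk : 1 ≤ k) :
    aChar l c k = bChar (posInt l c) k (l.length : Int) := by
  rw [posInt_eq, aChar_eq l c hk]
  obtain ⟨K, rfl⟩ : ∃ K : Nat, k = (K : Int) := ⟨k.toNat, by omega⟩
  have hK : 1 ≤ K := by exact_mod_cast hk
  rw [bChar_eq' c hK l]
  simp

theorem final_eq (s : String) (k : Int) (hk : 1 ≤ k) :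
    getkRepValue s k = getkRepValue_alt s k := by
  unfold getkRepValue getkRepValue_alt
  have hnodup : ((((PySem.List.enumerate s.toList).map (fun q => (q.2, q.1))).foldl
      (fun d q => d.modify q.1 [] (fun v => v ++ [q.2])) PySem.Dict.empty)).keys.Nodup :=
    PySem.Dict.nodup_keys_foldl_modify_key
      ((PySem.List.enumerate s.toList).map (fun q => (q.2, q.1)))
      (fun q => q.1) ([] : List Int)
      (fun _ q => (fun v => v ++ [q.2])) PySem.Dict.empty
      (by rw [PySem.Dict.keys_empty]; exact List.nodup_nil)
  have hkeys : ((((PySem.List.enumerate s.toList).map (fun q => (q.2, q.1))).foldl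
      (fun d q => d.modify q.1 [] (fun v => v ++ [q.2])) PySem.Dict.empty)).keys
      = PySem.Set.ofList s.toList := by
    have h := PySem.Dict.keys_foldl_modify_key
      ((PySem.List.enumerate s.toList).map (fun q => (q.2, q.1)))
      (fun q => q.1) ([] : List Int)
      (fun _ q => (fun v => v ++ [q.2])) PySem.Dict.empty
    refine Eq.trans h ?_
    rw [PySem.Dict.keys_empty]
    have h2 : (((PySem.List.enumerate s.toList).map (fun q => (q.2, q.1))).map (fun q => q.1))
        = s.toList := by
      rw [List.map_map]
      exact PySem.List.map_snd_enumerate s.toList 0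
    rw [h2]
    exact PySem.Set.update_empty s.toList
  have hgetD : ∀ ch, ((((PySem.List.enumerate s.toList).map (fun q => (q.2, q.1))).foldl
      (fun d q => d.modify q.1 [] (fun v => v ++ [q.2])) PySem.Dict.empty)).getD ch []
      = posInt s.toList ch := by
    intro ch
    rw [PySem.Dict.getD_foldl_modify_append _ _ ch, PySem.Dict.getD_empty]
    rfl
  rw [PySem.Dict.items_eq_map_keys _ hnodup [], List.foldl_map, hkeys]
  simp only [hgetD]
  apply PySem.List.foldl_congr_mem
  intro acc ch _
  rw [perchar s.toList ch hk]
  simp [PySem.List.len]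

-- ===== VERDICT (by name: the statement is the Claim_ definition above) =====
theorem getkRepValue_spec : Claim_equal_getkRepValue := by
  intro user_history k _ hpre
  unfold Spec_getkRepValue
  cases hpre with
  | inl h => subst h; rfl
  | inr h => exact final_eq user_history k h
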